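-- pv_equiv track=rewrite | github.com/bchwast/AGH-WDI | Ćwiczenia 11_12_13/ex_15.py | dwoj_jed
-- ===== SOURCE A (Python) =====
-- def dwoj_jed(key):
--     key_2 = key_1 = key
--     il_2 = il_1 = 0
--
--     while key_2 > 0:
--         if key_2%3 == 2:
--             il_2 += 1
--         key_2 //= 3
--
--     while key_1 > 0:
--         if key_1%3 == 1:
--             il_1 += 1
--         key_1 //= 3
--
--     return il_1 > il_2
-- ===== SOURCE B (Python) =====
-- def dwoj_jed(key):
--     balance = 0
--     while key > 0:
--         d = key % 3
--         if d == 1: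
--             balance += 1
--         elif d == 2:
--             balance -= 1
--         key //= 3
--     return balance > 0
-- ===== Notes on version B (the rewrite author's own statement) =====
-- stated objective: simpler
-- what changed: Replaces A's two separate passes over the base-3 digits with two counters by one single pass maintaining a signed balance (+1 for digit 1, -1 for digit 2) and returning balance > 0.
import Mathlib
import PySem

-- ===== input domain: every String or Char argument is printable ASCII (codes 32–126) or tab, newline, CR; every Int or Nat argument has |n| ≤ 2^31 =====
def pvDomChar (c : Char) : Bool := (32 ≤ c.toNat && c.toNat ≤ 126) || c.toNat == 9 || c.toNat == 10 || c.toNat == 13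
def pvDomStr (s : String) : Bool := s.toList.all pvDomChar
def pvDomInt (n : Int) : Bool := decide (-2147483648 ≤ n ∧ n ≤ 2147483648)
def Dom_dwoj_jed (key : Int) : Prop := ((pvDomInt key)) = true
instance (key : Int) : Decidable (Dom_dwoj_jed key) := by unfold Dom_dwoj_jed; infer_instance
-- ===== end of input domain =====

-- ===== PORT A =====
-- B changes: one pass with a signed balance instead of A's two digit-counting passes (same asymptotic cost).
def dwojLoop2 (k il : Int) : Int :=
  if k > 0 then
    dwojLoop2 (PySem.Int.floordiv k 3) (if PySem.Int.mod k 3 = 2 then il + 1 else il)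
  else il
termination_by k.toNat
decreasing_by rw [PySem.Int.floordiv_eq_ediv_of_pos (by omega : (0:Int) < 3)]; omega

def dwojLoop1 (k il : Int) : Int :=
  if k > 0 then
    dwojLoop1 (PySem.Int.floordiv k 3) (if PySem.Int.mod k 3 = 1 then il + 1 else il)
  else il
termination_by k.toNat
decreasing_by rw [PySem.Int.floordiv_eq_ediv_of_pos (by omega : (0:Int) < 3)]; omega

def dwoj_jed (key : Int) : Bool :=
  decide (dwojLoop1 key 0 > dwojLoop2 key 0)

-- ===== PORT B =====
def dwojBal (key bal : Int) : Int :=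
  if key > 0 then
    let d := PySem.Int.mod key 3
    dwojBal (PySem.Int.floordiv key 3)
      (if d = 1 then bal + 1 else if d = 2 then bal - 1 else bal)
  else bal
termination_by key.toNat
decreasing_by rw [PySem.Int.floordiv_eq_ediv_of_pos (by omega : (0:Int) < 3)]; omega

def dwoj_jed_alt (key : Int) : Bool :=
  decide (dwojBal key 0 > 0)

-- ===== PRECONDITION & SPEC =====
def Spec_dwoj_jed (key : Int) (out : Bool) : Prop := out = dwoj_jed_alt key
instance (key : Int) (out : Bool) : Decidable (Spec_dwoj_jed key out) := by unfold Spec_dwoj_jed; infer_instance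

-- ===== CLAIM (what is proved, stated in full; the proofs are below) =====
def Claim_equal_dwoj_jed : Prop := ∀ (key : Int), Dom_dwoj_jed key → Spec_dwoj_jed key (dwoj_jed key)

-- ===== LEMMAS AND PROOFS =====
theorem dwojLoop1_shift (n : Nat) : ∀ (k : Int), k.toNat = n → ∀ il, dwojLoop1 k il = il + dwojLoop1 k 0 := by
  induction n using Nat.strong_induction_on with
  | _ n ih =>
    intro k hk il
    rw [dwojLoop1]
    conv_rhs => rw [dwojLoop1]
    split_ifs with h hm
    all_goals try omega
    all_goals
      (have hlt : (PySem.Int.floordiv k 3).toNat < n := by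
        rw [PySem.Int.floordiv_eq_ediv_of_pos (by omega : (0:Int) < 3)]; omega
       have H := ih _ hlt (PySem.Int.floordiv k 3) rfl
       try rw [H (il + 1)]
       try rw [H (0 + 1)]
       try rw [H il]
       try omega)

theorem dwojLoop2_shift (n : Nat) : ∀ (k : Int), k.toNat = n → ∀ il, dwojLoop2 k il = il + dwojLoop2 k 0 := by
  induction n using Nat.strong_induction_on with
  | _ n ih =>
    intro k hk il
    rw [dwojLoop2]
    conv_rhs => rw [dwojLoop2]
    split_ifs with h hm
    all_goals try omega
    all_goals
      (have hlt : (PySem.Int.floordiv k 3).toNat < n := by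
        rw [PySem.Int.floordiv_eq_ediv_of_pos (by omega : (0:Int) < 3)]; omega
       have H := ih _ hlt (PySem.Int.floordiv k 3) rfl
       try rw [H (il + 1)]
       try rw [H (0 + 1)]
       try rw [H il]
       try omega)

theorem dwojBal_eq (n : Nat) : ∀ (k : Int), k.toNat = n → ∀ bal,
    dwojBal k bal = bal + dwojLoop1 k 0 - dwojLoop2 k 0 := by
  induction n using Nat.strong_induction_on with
  | _ n ih =>
    intro k hk bal
    rw [dwojBal, dwojLoop1, dwojLoop2]
    split_ifs with h h1 h2
    all_goals try omega
    all_goals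
      (have hlt : (PySem.Int.floordiv k 3).toNat < n := by
        rw [PySem.Int.floordiv_eq_ediv_of_pos (by omega : (0:Int) < 3)]; omega
       have HB := ih _ hlt (PySem.Int.floordiv k 3) rfl
       have H1 := dwojLoop1_shift _ (PySem.Int.floordiv k 3) rfl
       have H2 := dwojLoop2_shift _ (PySem.Int.floordiv k 3) rfl
       rw [HB]
       try rw [H1 (0 + 1)]
       try rw [H2 (0 + 1)]
       omega)

-- ===== VERDICT (by name: the statement is the Claim_ definition above) =====
theorem dwoj_jed_spec : Claim_equal_dwoj_jed := by
  intro key _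
  unfold Spec_dwoj_jed dwoj_jed dwoj_jed_alt
  rw [dwojBal_eq key.toNat key rfl 0]
  rw [decide_eq_decide]
  omega
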